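-- pv_equiv track=rewrite | github.com/brainvisa/axon | brainvisa/qt3gui/neuroDataGUI.py | _quote
-- ===== SOURCE A (Python) =====
-- def _quote( text ):
--   quote = ''
--   result = ''
--   for c in text:
--     if c in ( "'", '"' ):
--       if c == quote:
--         result += '\\'
--       elif not quote:
--         if c == '"': quote = "'"
--         else: quote = '"'
--     elif c == '\\':
--       result += '\\'
--     result += c
--   if not quote: quote = "'"
--   return quote + result + quote
-- ===== SOURCE B (Python) =====
-- def _quote(text):
--     # pick delimiter: opposite of the first quote char seen, default "'"
--     delim = "'"
--     for c in text:
--         if c == "'":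
--             delim = '"'
--             break
--         if c == '"':
--             delim = "'"
--             break
--     body = ''.join('\\' + c if c == delim or c == '\\' else c for c in text)
--     return delim + body + delim
-- ===== Notes on version B (the rewrite author's own statement) =====
-- stated objective: simpler
-- what changed: Replaced the single stateful loop that interleaves delimiter selection and escaping with two separate passes: a first pass finds the first quote character to pick the delimiter, then a comprehension escapes delimiter/backslash.
import Mathlib
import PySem

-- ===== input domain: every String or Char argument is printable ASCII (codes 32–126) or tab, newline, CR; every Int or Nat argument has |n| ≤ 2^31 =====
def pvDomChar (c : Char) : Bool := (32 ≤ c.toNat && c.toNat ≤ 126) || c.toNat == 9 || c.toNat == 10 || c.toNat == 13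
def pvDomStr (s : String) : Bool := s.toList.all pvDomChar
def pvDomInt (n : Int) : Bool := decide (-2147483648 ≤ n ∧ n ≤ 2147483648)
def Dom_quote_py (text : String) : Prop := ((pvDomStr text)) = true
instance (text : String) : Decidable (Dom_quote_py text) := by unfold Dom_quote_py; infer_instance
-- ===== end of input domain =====

-- B separates delimiter selection (first pass) from escaping (second pass); A does both in one stateful loop.

-- ===== PORT A =====
-- state: (quote, result) as in A; one step per character, same branch order
def quoteA_loop : String → List Char → List Char → String × List Char
  | quote, result, [] => (quote, result)
  | quote, result, c :: cs =>
    if c = '\'' ∨ c = '"' then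
      if String.singleton c = quote then
        quoteA_loop quote (result ++ ['\\', c]) cs
      else if quote = "" then
        quoteA_loop (if c = '"' then "'" else "\"") (result ++ [c]) cs
      else
        quoteA_loop quote (result ++ [c]) cs
    else if c = '\\' then
      quoteA_loop quote (result ++ ['\\', c]) cs
    else
      quoteA_loop quote (result ++ [c]) cs

def quote_py (text : String) : String :=
  let p := quoteA_loop "" [] text.toList
  let q := if p.1 = "" then "'" else p.1
  q ++ String.mk p.2 ++ q

-- ===== PORT B =====
-- first pass: the delimiter is the opposite of the first quote char, default '
def findDelim : List Char → Char
  | [] => '\''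
  | c :: cs => if c = '\'' then '"' else if c = '"' then '\'' else findDelim cs

-- second pass: escape the delimiter and backslash
def escBody (d : Char) (cs : List Char) : List Char :=
  cs.flatMap (fun c => if c = d ∨ c = '\\' then ['\\', c] else [c])

def quote_py_alt (text : String) : String :=
  let d := findDelim text.toList
  String.singleton d ++ String.mk (escBody d text.toList) ++ String.singleton d

-- ===== PRECONDITION & SPEC =====
def Spec_quote_py (text : String) (out : String) : Prop := out = quote_py_alt text
instance (text : String) (out : String) : Decidable (Spec_quote_py text out) := by unfold Spec_quote_py; infer_instance

-- ===== CLAIM (what is proved, stated in full; the proofs are below) =====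
def Claim_equal_quote_py : Prop := ∀ (text : String), Dom_quote_py text → Spec_quote_py text (quote_py text)

-- ===== LEMMAS AND PROOFS =====

-- once the delimiter d (a quote char) is set, A escapes exactly d and backslash
lemma quoteA_loop_set (d : Char) (hd : d = '\'' ∨ d = '"') :
    ∀ (cs : List Char) (r : List Char),
      quoteA_loop (String.singleton d) r cs = (String.singleton d, r ++ escBody d cs) := by
  intro cs
  induction cs with
  | nil => intro r; simp [quoteA_loop, escBody]
  | cons c cs ih =>
    intro r
    by_cases hq : c = '\'' ∨ c = '"'
    · by_cases hcd : c = d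
      · subst hcd
        simp [quoteA_loop, hq, escBody, ih]
      · have hne : String.singleton c ≠ String.singleton d := by
          intro h
          exact hcd (by simpa using congrArg (fun s => s.toList) h)
        have hnb : c ≠ '\\' := by rcases hq with h | h <;> simp [h]
        have hns : String.singleton d ≠ "" := by
          rcases hd with h | h <;> subst h <;> decide
        simp only [quoteA_loop, if_pos hq, if_neg hne, if_neg hns]
        simp [escBody, hcd, hnb, ih]
    · by_cases hb : c = '\\'
      · subst hb
        simp [quoteA_loop, hq, escBody, ih]
      · have hcd : c ≠ d := fun h => hq (h ▸ hd)
        simp [quoteA_loop, hq, hb, escBody, ih, hcd]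

lemma findDelim_quote (cs : List Char) : findDelim cs = '\'' ∨ findDelim cs = '"' := by
  induction cs with
  | nil => simp [findDelim]
  | cons c cs ih =>
    by_cases h1 : c = '\''
    · simp [findDelim, h1]
    · by_cases h2 : c = '"' <;> simp [findDelim, h1, h2, ih]

-- from the empty state, A's loop computes B's delimiter and B's escaped body
lemma quoteA_loop_empty :
    ∀ (cs : List Char) (r : List Char),
      quoteA_loop "" r cs =
        ((if cs.any (fun c => c = '\'' ∨ c = '"') then String.singleton (findDelim cs) else ""),
         r ++ escBody (findDelim cs) cs) := by
  intro cs
  induction cs with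
  | nil => intro r; simp [quoteA_loop, escBody, findDelim]
  | cons c cs ih =>
    intro r
    by_cases hq : c = '\'' ∨ c = '"'
    · rcases hq with h | h
      · subst h
        have step : quoteA_loop "" r ('\'' :: cs) =
            quoteA_loop (String.singleton '"') (r ++ ['\'']) cs := by
          simp [quoteA_loop]
          rfl
        rw [step, quoteA_loop_set '"' (Or.inr rfl) cs]
        simp [findDelim, escBody, List.any_cons]
      · subst h
        have step : quoteA_loop "" r ('"' :: cs) =
            quoteA_loop (String.singleton '\'') (r ++ ['"']) cs := by
          simp [quoteA_loop]
          rfl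
        rw [step, quoteA_loop_set '\'' (Or.inl rfl) cs]
        simp [findDelim, escBody, List.any_cons]
    · have h1 : c ≠ '\'' := fun h => hq (Or.inl h)
      have h2 : c ≠ '"' := fun h => hq (Or.inr h)
      have hfd : findDelim (c :: cs) = findDelim cs := by simp [findDelim, h1, h2]
      have hcd : c ≠ findDelim cs := by
        rcases findDelim_quote cs with h | h <;> rw [h] <;> assumption
      by_cases hb : c = '\\'
      · subst hb
        simp [quoteA_loop, hq, hfd, escBody, ih, List.any_cons, h1, h2]
      · simp [quoteA_loop, hq, hb, hfd, escBody, ih, List.any_cons, h1, h2, hcd]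

lemma findDelim_none (cs : List Char) (h : ¬ cs.any (fun c => c = '\'' ∨ c = '"')) :
    findDelim cs = '\'' := by
  induction cs with
  | nil => rfl
  | cons c cs ih =>
    simp only [List.any_cons, Bool.or_eq_true, not_or, decide_eq_true_eq, not_or] at h
    simp only [findDelim, if_neg h.1.1, if_neg h.1.2]
    exact ih (by simpa using h.2)

-- ===== VERDICT (by name: the statement is the Claim_ definition above) =====
theorem quote_py_spec : Claim_equal_quote_py := by
  intro text _
  unfold Spec_quote_py quote_py quote_py_alt
  rw [quoteA_loop_empty]
  by_cases hany : text.toList.any (fun c => c = '\'' ∨ c = '"')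
  · have hne : String.singleton (findDelim text.toList) ≠ "" := by
      rcases findDelim_quote text.toList with h | h <;> rw [h] <;> decide
    simp only [if_pos hany, if_neg hne, List.nil_append]
  · have hfd : findDelim text.toList = '\'' := findDelim_none text.toList hany
    simp only [if_neg hany, List.nil_append, hfd]
    rfl
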